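-- pv_equiv track=rewrite | github.com/erikdelbom/advent-of-code | 2023/05/trash/sol2.py | get_conversion_maps
-- ===== SOURCE A (Python) =====
-- def get_conversion_maps(data):
--     conversion_maps = []
--     conversion_map = []
--     for line in data:
--         if line == '':
--             conversion_maps.append(conversion_map)
--             conversion_map = []
--         else:
--             conversion_map.append(line)
--     conversion_maps.append(conversion_map)
--     return conversion_maps
-- ===== SOURCE B (Python) =====
-- def get_conversion_maps(data):
--     seps = [i for i, line in enumerate(data) if line == '']
--     groups = []
--     start = 0
--     for s in seps:
--         groups.append(data[start:s])
--         start = s + 1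
--     groups.append(data[start:])
--     return groups
-- ===== Notes on version B (the rewrite author's own statement) =====
-- stated objective: alternative
-- what changed: Replaces the running-accumulator single pass with a two-phase decomposition: first build an index table of separator positions, then emit the groups by slicing data between consecutive separators.
import Mathlib
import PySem

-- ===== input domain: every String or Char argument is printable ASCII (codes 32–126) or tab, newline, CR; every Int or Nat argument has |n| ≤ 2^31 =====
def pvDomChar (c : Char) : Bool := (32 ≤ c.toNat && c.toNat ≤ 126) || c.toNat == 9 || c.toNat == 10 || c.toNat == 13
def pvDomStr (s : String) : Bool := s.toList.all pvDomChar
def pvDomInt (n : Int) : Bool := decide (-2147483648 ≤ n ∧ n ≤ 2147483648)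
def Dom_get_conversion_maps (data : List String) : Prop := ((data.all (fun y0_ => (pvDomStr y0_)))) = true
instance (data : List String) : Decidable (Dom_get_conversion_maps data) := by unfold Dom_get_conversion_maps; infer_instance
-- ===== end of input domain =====

-- B replaces A's running-accumulator pass with an index table of separator positions
-- followed by a slicing pass (alternative decomposition, same cost).

-- ===== PORT A =====
def get_conversion_maps (data : List String) : List (List String) :=
  let st := data.foldl
    (fun (acc : List (List String) × List String) line =>
      if line = "" then (acc.1 ++ [acc.2], []) else (acc.1, acc.2 ++ [line]))
    ([], [])
  st.1 ++ [st.2]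

-- ===== PORT B =====
def get_conversion_maps_alt (data : List String) : List (List String) :=
  let seps := ((PySem.List.enumerate data 0).filter (fun p => p.2 == "")).map (·.1)
  let st := seps.foldl
    (fun (a : List (List String) × Int) s =>
      (a.1 ++ [PySem.List.slice data (some a.2) (some s)], s + 1))
    ([], 0)
  st.1 ++ [PySem.List.slice data (some st.2) none]

-- ===== PRECONDITION & SPEC =====
def Spec_get_conversion_maps (data : List String) (out : List (List String)) : Prop := out = get_conversion_maps_alt data
instance (data : List String) (out : List (List String)) : Decidable (Spec_get_conversion_maps data out) := by unfold Spec_get_conversion_maps; infer_instance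

-- ===== CLAIM (what is proved, stated in full; the proofs are below) =====
def Claim_equal_get_conversion_maps : Prop := ∀ (data : List String), Dom_get_conversion_maps data → Spec_get_conversion_maps data (get_conversion_maps data)

-- ===== LEMMAS AND PROOFS =====

-- reference splitter: the intended grouping, used only in the proofs
def pvSplit : List String → List (List String)
  | [] => [[]]
  | l :: t =>
      if l = "" then [] :: pvSplit t
      else
        match pvSplit t with
        | [] => [[l]]
        | g :: gs => (l :: g) :: gs

def pvCons (m : List String) : List (List String) → List (List String)
  | [] => [m]
  | g :: gs => (m ++ g) :: gs

theorem pvSplit_ne_nil (t : List String) : pvSplit t ≠ [] := by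
  cases t with
  | nil => simp [pvSplit]
  | cons l t =>
      simp only [pvSplit]
      split_ifs
      · simp
      · cases h : pvSplit t <;> simp

theorem A_loop (t : List String) : ∀ (ms : List (List String)) (m : List String),
    (let st := t.foldl
        (fun (acc : List (List String) × List String) line =>
          if line = "" then (acc.1 ++ [acc.2], []) else (acc.1, acc.2 ++ [line]))
        (ms, m)
     st.1 ++ [st.2]) = ms ++ pvCons m (pvSplit t) := by
  induction t with
  | nil => intro ms m; simp [pvSplit, pvCons]
  | cons l t ih =>
      intro ms m
      by_cases hl : l = ""
      · simp only [List.foldl_cons, hl, pvSplit, if_true]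
        rw [ih]
        cases h : pvSplit t with
        | nil => exact absurd h (pvSplit_ne_nil t)
        | cons g gs => simp [pvCons]
      · simp only [List.foldl_cons, if_neg hl, pvSplit]
        rw [ih]
        cases h : pvSplit t with
        | nil => exact absurd h (pvSplit_ne_nil t)
        | cons g gs => simp [pvCons]

theorem take_drop_prefix (pre rest : List String) (start : Nat) (h : start ≤ pre.length) :
    ((pre ++ rest).drop start).take (pre.length - start) = pre.drop start := by
  rw [List.drop_append_of_le_length h]
  rw [List.take_append_of_le_length (by simp)]
  exact List.take_of_length_le (by simp)

theorem B_loop (t : List String) : ∀ (pre : List String) (acc : List (List String)) (start : Nat),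
    start ≤ pre.length →
    (let st := (((PySem.List.enumerate t (pre.length : Int)).filter (fun p => p.2 == "")).map (·.1)).foldl
        (fun (a : List (List String) × Int) s =>
          (a.1 ++ [PySem.List.slice (pre ++ t) (some a.2) (some s)], s + 1))
        (acc, (start : Int))
     st.1 ++ [PySem.List.slice (pre ++ t) (some st.2) none]) = acc ++ pvCons (pre.drop start) (pvSplit t) := by
  induction t with
  | nil =>
      intro pre acc start h
      simp [PySem.List.enumerate_nil, pvSplit, pvCons, PySem.List.slice_from_natCast]
  | cons l t ih =>
      intro pre acc start h
      by_cases hl : l = ""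
      · have hfilter : ((PySem.List.enumerate (l :: t) (pre.length : Int)).filter (fun p => p.2 == "")) =
            ((pre.length : Int), l) :: ((PySem.List.enumerate t ((pre.length : Int) + 1)).filter (fun p => p.2 == "")) := by
          rw [PySem.List.enumerate_cons]
          simp [hl]
        rw [hfilter]
        simp only [List.map_cons, List.foldl_cons]
        have hcast : ((pre.length : Int) + 1) = (((pre ++ [l]).length : Nat) : Int) := by simp
        have happ : pre ++ l :: t = (pre ++ [l]) ++ t := by simp
        rw [happ, hcast]
        rw [ih (pre ++ [l]) (acc ++ [PySem.List.slice ((pre ++ [l]) ++ t) (some (start : Int)) (some (pre.length : Int))]) (pre ++ [l]).length (le_refl _)]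
        have hslice : PySem.List.slice ((pre ++ [l]) ++ t) (some (start : Int)) (some (pre.length : Int)) = pre.drop start := by
          rw [PySem.List.slice_natCast]
          have : (pre ++ [l]) ++ t = pre ++ ([l] ++ t) := by simp
          rw [this]
          exact take_drop_prefix pre ([l] ++ t) start h
        rw [hslice]
        have hdrop : (pre ++ [l]).drop (pre ++ [l]).length = [] := by simp
        rw [hdrop]
        simp only [pvSplit, hl, if_true]
        cases hs : pvSplit t with
        | nil => exact absurd hs (pvSplit_ne_nil t)
        | cons g gs => simp [pvCons]
      · have hfilter : ((PySem.List.enumerate (l :: t) (pre.length : Int)).filter (fun p => p.2 == "")) =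
            ((PySem.List.enumerate t ((pre.length : Int) + 1)).filter (fun p => p.2 == "")) := by
          rw [PySem.List.enumerate_cons]
          simp [hl]
        rw [hfilter]
        have hcast : ((pre.length : Int) + 1) = (((pre ++ [l]).length : Nat) : Int) := by simp
        have happ : pre ++ l :: t = (pre ++ [l]) ++ t := by simp
        rw [happ, hcast]
        rw [ih (pre ++ [l]) acc start (by simp; omega)]
        have hdrop : (pre ++ [l]).drop start = pre.drop start ++ [l] := by
          rw [List.drop_append_of_le_length h]
        rw [hdrop]
        simp only [pvSplit, if_neg hl]
        cases hs : pvSplit t with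
        | nil => exact absurd hs (pvSplit_ne_nil t)
        | cons g gs => simp [pvCons]

-- ===== VERDICT (by name: the statement is the Claim_ definition above) =====
theorem get_conversion_maps_spec : Claim_equal_get_conversion_maps := by
  intro data _
  show get_conversion_maps data = get_conversion_maps_alt data
  have hA := A_loop data [] []
  have hB := B_loop data [] [] 0 (by simp)
  simp only [List.nil_append, List.length_nil, Nat.cast_zero, List.drop_nil] at hA hB
  unfold get_conversion_maps get_conversion_maps_alt
  rw [hA]
  simpa using hB.symm
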